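-- pv_equiv track=rewrite | github.com/mucosal-immunology-lab/nf-mucimmuno | metagenomics/modules/bracken/filter_bracken_report.py | lineage_for_taxid
-- ===== SOURCE A (Python) =====
-- def lineage_for_taxid(taxid, parents, ranks, names, desired_ranks):
--     lineage = {r: "" for r in desired_ranks}
--     current = taxid
--     visited = set()
--     while current in parents and current not in visited:
--         rank = ranks.get(current)
--         rank_key = "kingdom" if rank == "superkingdom" else rank
--         if rank_key in desired_ranks and not lineage[rank_key]:
--             lineage[rank_key] = names.get(current, "")
--             if all(lineage[r] for r in desired_ranks):
--                 break
--         visited.add(current)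
--         parent = parents.get(current)
--         if parent == current:
--             break
--         current = parent
--     return lineage
-- ===== SOURCE B (Python) =====
-- def lineage_for_taxid(taxid, parents, ranks, names, desired_ranks):
--     # Pass 1: walk the parent chain once, recording the visited taxids in order.
--     path = []
--     seen = set()
--     current = taxid
--     while current in parents and current not in seen:
--         path.append(current)
--         seen.add(current)
--         parent = parents.get(current)
--         if parent == current:
--             break
--         current = parent
--     # Pass 2: fill the desired ranks, first occurrence wins.
--     lineage = {r: "" for r in desired_ranks}
--     for node in path:
--         rank = ranks.get(node)
--         rank_key = "kingdom" if rank == "superkingdom" else rank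
--         if rank_key in desired_ranks and not lineage[rank_key]:
--             lineage[rank_key] = names.get(node, "")
--     return lineage
-- ===== Notes on version B (the rewrite author's own statement) =====
-- stated objective: alternative
-- what changed: A's single fused while-loop that walks the parent chain and fills ranks (with an early break once all desired ranks are filled) is split into two passes: one loop that collects the visited taxid path, then a fold over that path that applies the superkingdom->kingdom remap and first-occurrence-wins rank filling.
import Mathlib
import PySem

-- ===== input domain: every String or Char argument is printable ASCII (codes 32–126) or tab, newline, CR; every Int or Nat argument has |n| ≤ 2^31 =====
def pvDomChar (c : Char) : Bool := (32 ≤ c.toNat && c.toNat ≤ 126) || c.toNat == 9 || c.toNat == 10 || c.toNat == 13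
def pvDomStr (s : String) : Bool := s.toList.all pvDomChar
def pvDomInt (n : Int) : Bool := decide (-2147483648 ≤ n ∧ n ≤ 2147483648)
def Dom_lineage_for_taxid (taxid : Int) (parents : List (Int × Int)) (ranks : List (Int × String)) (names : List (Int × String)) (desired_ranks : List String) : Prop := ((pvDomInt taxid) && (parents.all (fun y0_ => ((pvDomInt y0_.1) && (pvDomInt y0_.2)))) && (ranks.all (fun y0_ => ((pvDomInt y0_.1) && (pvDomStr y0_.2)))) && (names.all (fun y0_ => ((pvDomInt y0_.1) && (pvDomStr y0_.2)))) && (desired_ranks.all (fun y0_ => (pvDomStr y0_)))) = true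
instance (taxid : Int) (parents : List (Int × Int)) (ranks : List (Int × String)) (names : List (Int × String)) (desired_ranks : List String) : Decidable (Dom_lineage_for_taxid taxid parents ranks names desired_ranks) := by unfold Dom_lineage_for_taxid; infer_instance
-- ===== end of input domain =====

-- B separates A's fused walk-and-fill loop (with its early all-filled break) into two passes:
-- collect the parent-chain path once, then fill the desired ranks by a fold over that path
-- (objective: alternative decomposition; same cost).

-- ===== PORT A =====

-- {r: "" for r in desired_ranks}  (shared by both ports: both Pythons start with the same comprehension)
def pvInitLineage (desired : List String) : PySem.Dict String String :=
  desired.foldl (fun d r => d.insert r "") PySem.Dict.empty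

-- A's while-loop: state (lineage, current, visited); fuel = |parents| + 1 strictly exceeds the
-- number of iterations (each iteration adds a fresh key of parents to visited), so it never runs out.
-- one execution of A's loop body up to the break checks: (new lineage, break-because-all-filled?)
def pvStepA (ranks names : PySem.Dict Int String) (desired : List String)
    (lineage : PySem.Dict String String) (current : Int) : PySem.Dict String String × Bool :=
  match ranks.get? current with
  | none => (lineage, false)              -- rank_key is None: never in desired_ranks
  | some r =>
    let key := if r = "superkingdom" then "kingdom" else r
    if desired.contains key && decide (lineage.getD key "" = "") then
      let l' := lineage.insert key (names.getD current "")
      (l', desired.all (fun q => !(decide (l'.getD q "" = ""))))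
    else (lineage, false)

def pvLoopA (parents : PySem.Dict Int Int) (ranks names : PySem.Dict Int String)
    (desired : List String) :
    Nat → PySem.Dict String String → Int → PySem.Set Int → PySem.Dict String String
  | 0, lineage, _, _ => lineage
  | fuel+1, lineage, current, visited =>
    if (parents.get? current).isSome && !(PySem.Set.contains visited current) then
      let step := pvStepA ranks names desired lineage current
      if step.2 then step.1
      else
        match parents.get? current with
        | some p =>
          if p = current then step.1
          else pvLoopA parents ranks names desired fuel step.1 p (PySem.Set.add visited current)
        | none => step.1                        -- unreachable: guard proved get? isSome
    else lineage

def lineage_for_taxid (taxid : Int) (parents : List (Int × Int)) (ranks : List (Int × String)) (names : List (Int × String)) (desired_ranks : List String) : List (String × String) :=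
  (pvLoopA (PySem.Dict.mk parents) (PySem.Dict.mk ranks) (PySem.Dict.mk names) desired_ranks
    (parents.length + 1) (pvInitLineage desired_ranks) taxid PySem.Set.empty).items

-- ===== PORT B =====

-- Pass 1 of Source B: walk the chain, returning the visited taxids in order (same fuel argument).
def pvCollect (parents : PySem.Dict Int Int) :
    Nat → Int → PySem.Set Int → List Int
  | 0, _, _ => []
  | fuel+1, current, visited =>
    if (parents.get? current).isSome && !(PySem.Set.contains visited current) then
      current ::
        (match parents.get? current with
         | some p =>
           if p = current then []
           else pvCollect parents fuel p (PySem.Set.add visited current)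
         | none => [])
    else []

-- Pass 2 of Source B: one rank-filling step (first occurrence wins).
def pvFill (ranks names : PySem.Dict Int String) (desired : List String)
    (lineage : PySem.Dict String String) (node : Int) : PySem.Dict String String :=
  match ranks.get? node with
  | none => lineage
  | some r =>
    let key := if r = "superkingdom" then "kingdom" else r
    if desired.contains key && decide (lineage.getD key "" = "") then
      lineage.insert key (names.getD node "")
    else lineage

def lineage_for_taxid_alt (taxid : Int) (parents : List (Int × Int)) (ranks : List (Int × String)) (names : List (Int × String)) (desired_ranks : List String) : List (String × String) :=
  ((pvCollect (PySem.Dict.mk parents) (parents.length + 1) taxid PySem.Set.empty).foldl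
    (pvFill (PySem.Dict.mk ranks) (PySem.Dict.mk names) desired_ranks)
    (pvInitLineage desired_ranks)).items

-- ===== PRECONDITION & SPEC =====
def Spec_lineage_for_taxid (taxid : Int) (parents : List (Int × Int)) (ranks : List (Int × String)) (names : List (Int × String)) (desired_ranks : List String) (out : List (String × String)) : Prop := out = lineage_for_taxid_alt taxid parents ranks names desired_ranks
instance (taxid : Int) (parents : List (Int × Int)) (ranks : List (Int × String)) (names : List (Int × String)) (desired_ranks : List String) (out : List (String × String)) : Decidable (Spec_lineage_for_taxid taxid parents ranks names desired_ranks out) := by unfold Spec_lineage_for_taxid; infer_instance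

-- ===== CLAIM (what is proved, stated in full; the proofs are below) =====
def Claim_equal_lineage_for_taxid : Prop := ∀ (taxid : Int) (parents : List (Int × Int)) (ranks : List (Int × String)) (names : List (Int × String)) (desired_ranks : List String), Dom_lineage_for_taxid taxid parents ranks names desired_ranks → Spec_lineage_for_taxid taxid parents ranks names desired_ranks (lineage_for_taxid taxid parents ranks names desired_ranks)

-- ===== LEMMAS AND PROOFS =====

-- Once every desired rank is filled, a fill step is a no-op.
lemma pvFill_of_all (ranks names : PySem.Dict Int String) (desired : List String)
    (l : PySem.Dict String String)
    (h : desired.all (fun q => !(decide (l.getD q "" = ""))) = true) (x : Int) :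
    pvFill ranks names desired l x = l := by
  have key_false : ∀ (k v : String),
      (if desired.contains k && decide (l.getD k "" = "") then l.insert k v else l) = l := by
    intro k v
    rw [if_neg]
    simp only [Bool.and_eq_true, decide_eq_true_eq, not_and]
    intro hk hempty
    have hm : k ∈ desired := by simpa using hk
    have := List.all_eq_true.mp h _ hm
    simp [hempty] at this
  unfold pvFill
  cases ranks.get? x with
  | none => rfl
  | some r => dsimp only; split <;> exact key_false _ _

lemma pvFoldl_fill_of_all (ranks names : PySem.Dict Int String) (desired : List String)
    (l : PySem.Dict String String)
    (h : desired.all (fun q => !(decide (l.getD q "" = ""))) = true) (xs : List Int) :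
    xs.foldl (pvFill ranks names desired) l = l := by
  induction xs with
  | nil => rfl
  | cons x xs ih =>
    simp only [List.foldl_cons, pvFill_of_all ranks names desired l h x, ih]

lemma pvStepA_fst (ranks names : PySem.Dict Int String) (desired : List String)
    (lineage : PySem.Dict String String) (current : Int) :
    (pvStepA ranks names desired lineage current).1
      = pvFill ranks names desired lineage current := by
  unfold pvStepA pvFill
  cases ranks.get? current with
  | none => rfl
  | some r => dsimp only; split <;> split <;> rfl

lemma pvStepA_snd (ranks names : PySem.Dict Int String) (desired : List String)
    (lineage : PySem.Dict String String) (current : Int)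
    (h : (pvStepA ranks names desired lineage current).2 = true) :
    (desired.all (fun q =>
      !(decide ((pvStepA ranks names desired lineage current).1.getD q "" = "")))) = true := by
  unfold pvStepA at h ⊢
  revert h
  cases ranks.get? current with
  | none => intro h; exact absurd h (by simp)
  | some r =>
    intro h
    dsimp only at h ⊢
    by_cases hc : (desired.contains (if r = "superkingdom" then "kingdom" else r)
        && decide (lineage.getD (if r = "superkingdom" then "kingdom" else r) "" = "")) = true
    · simp only [hc, if_true] at h ⊢; exact h
    · rw [if_neg hc] at h; simp at h

-- A's fused loop equals B's collect-then-fold, for any fuel and state.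
lemma pvLoopA_eq_foldl (parents : PySem.Dict Int Int) (ranks names : PySem.Dict Int String)
    (desired : List String) :
    ∀ (fuel : Nat) (current : Int) (visited : PySem.Set Int) (lineage : PySem.Dict String String),
      pvLoopA parents ranks names desired fuel lineage current visited
      = (pvCollect parents fuel current visited).foldl (pvFill ranks names desired) lineage := by
  intro fuel
  induction fuel with
  | zero => intro current visited lineage; rfl
  | succ fuel ih =>
    intro current visited lineage
    unfold pvLoopA pvCollect
    cases hps : parents.get? current with
    | none => simp [hps]
    | some p =>
      by_cases hv : current ∈ visited
      · simp [hps, hv]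
      · by_cases hb : (pvStepA ranks names desired lineage current).2 = true
        · have hall := pvStepA_snd ranks names desired lineage current hb
          by_cases hpc : p = current <;>
            simp [hps, hv, hb, hpc, List.foldl_cons,
              ← pvStepA_fst ranks names desired lineage current,
              pvFoldl_fill_of_all ranks names desired _ hall]
        · rw [Bool.not_eq_true] at hb
          by_cases hpc : p = current
          · simp [hps, hv, hb, hpc, ← pvStepA_fst ranks names desired lineage current]
          · simp [hps, hv, hb, hpc, ← pvStepA_fst ranks names desired lineage current, ih p]

-- ===== VERDICT (by name: the statement is the Claim_ definition above) =====
theorem lineage_for_taxid_spec : Claim_equal_lineage_for_taxid := by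
  intro taxid parents ranks names desired_ranks _
  unfold Spec_lineage_for_taxid lineage_for_taxid lineage_for_taxid_alt
  rw [pvLoopA_eq_foldl]
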